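-- pv_equiv track=rewrite | github.com/arianasanchezz/IP-2C-2023 | Python/Parcial-Python/ejercicio4.py | matriz_capicua
-- ===== SOURCE A (Python) =====
-- def matriz_capicua(m: list[list]) -> bool:
--     res: bool = True
--     i: int = 0
--
--     while i < len(m):
--         fila_invertida = m[i][::-1]
--
--         if m[i] != fila_invertida:
--             res = False
--
--         i += 1
--
--     return res
-- ===== SOURCE B (Python) =====
-- def matriz_capicua(m: list[list]) -> bool:
--     def es_capicua(fila):
--         lo, hi = 0, len(fila) - 1
--         while lo < hi:
--             if fila[lo] != fila[hi]:
--                 return False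
--             lo += 1
--             hi -= 1
--         return True
--     return all(es_capicua(fila) for fila in m)
-- ===== Notes on version B (the rewrite author's own statement) =====
-- stated objective: idiomatic
-- what changed: Per-row two-pointer index scan with early exit inside all(...), instead of building a reversed copy of each row and comparing whole lists while carrying a result flag through the entire matrix.
import Mathlib
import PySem

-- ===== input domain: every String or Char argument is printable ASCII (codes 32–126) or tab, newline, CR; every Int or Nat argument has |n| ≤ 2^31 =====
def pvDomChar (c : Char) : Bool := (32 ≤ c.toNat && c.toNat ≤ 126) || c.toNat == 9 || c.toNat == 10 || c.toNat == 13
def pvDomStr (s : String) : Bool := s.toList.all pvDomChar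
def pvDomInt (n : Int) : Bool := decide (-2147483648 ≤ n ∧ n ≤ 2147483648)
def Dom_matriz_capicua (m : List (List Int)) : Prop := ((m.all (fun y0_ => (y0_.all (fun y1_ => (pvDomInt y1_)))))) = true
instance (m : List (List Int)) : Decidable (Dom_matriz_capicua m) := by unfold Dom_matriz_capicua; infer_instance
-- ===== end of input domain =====

-- B replaces A's reversed-copy comparison per row (with a carried result flag) by an
-- early-exiting two-pointer scan of each row inside all(...); same cost, more idiomatic.

-- ===== PORT A =====
-- while loop over rows: fila_invertida = m[i][::-1] (Python xs[::-1] is the reversed copy,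
-- ported exactly as List.reverse); res set to False on mismatch, never reset.
def matriz_capicua (m : List (List Int)) : Bool :=
  m.foldl (fun res fila =>
    let fila_invertida := fila.reverse
    if fila ≠ fila_invertida then false else res) true

-- ===== PORT B =====
-- two-pointer inner while loop, fila[lo]/fila[hi] via pyGetD (indices always in range when lo < hi)
def esCapicua (fila : List Int) (lo hi : Nat) : Bool :=
  if lo < hi then
    if PySem.List.pyGetD fila (lo : Int) 0 ≠ PySem.List.pyGetD fila (hi : Int) 0 then false
    else esCapicua fila (lo + 1) (hi - 1)
  else true
termination_by hi - lo

def matriz_capicua_alt (m : List (List Int)) : Bool :=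
  m.all (fun fila => esCapicua fila 0 (fila.length - 1))

-- ===== PRECONDITION & SPEC =====
def Spec_matriz_capicua (m : List (List Int)) (out : Bool) : Prop := out = matriz_capicua_alt m
instance (m : List (List Int)) (out : Bool) : Decidable (Spec_matriz_capicua m out) := by unfold Spec_matriz_capicua; infer_instance

-- ===== CLAIM (what is proved, stated in full; the proofs are below) =====
def Claim_equal_matriz_capicua : Prop := ∀ (m : List (List Int)), Dom_matriz_capicua m → Spec_matriz_capicua m (matriz_capicua m)

-- ===== LEMMAS AND PROOFS =====

-- the two-pointer loop checks exactly the mirror equations on the closed range [lo, hi]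
theorem esCapicua_iff (fila : List Int) (lo hi : Nat) :
    esCapicua fila lo hi = true ↔
      ∀ k, lo ≤ k → k ≤ hi → fila.getD k 0 = fila.getD (lo + hi - k) 0 := by
  induction lo, hi using esCapicua.induct fila with
  | case1 lo hi hlt hne =>
    rw [esCapicua]
    simp only [PySem.List.pyGetD_natCast] at hne
    rw [if_pos hlt, if_pos (by simpa [PySem.List.pyGetD_natCast] using hne)]
    constructor
    · intro h; exact absurd h (by simp)
    · intro h; exact absurd (h lo le_rfl (by omega)) (by simpa using hne)
  | case2 lo hi hlt hne ih =>
    rw [esCapicua]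
    have heq : fila.getD lo 0 = fila.getD hi 0 := by
      simpa [PySem.List.pyGetD_natCast] using hne
    rw [if_pos hlt, if_neg (by simpa [PySem.List.pyGetD_natCast] using hne)]
    constructor
    · intro h k hk1 hk2
      rcases Nat.eq_or_lt_of_le hk1 with rfl | hk1'
      · simpa using heq
      rcases Nat.eq_or_lt_of_le hk2 with rfl | hk2'
      · simpa [Nat.add_sub_cancel_left] using heq.symm
      have := (ih.mp h) k hk1' (by omega)
      rwa [show lo + 1 + (hi - 1) - k = lo + hi - k by omega] at this
    · intro h
      refine ih.mpr ?_
      intro k hk1 hk2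
      have := h k (by omega) (by omega)
      rwa [show lo + hi - k = lo + 1 + (hi - 1) - k by omega] at this
  | case3 lo hi hlt =>
    rw [esCapicua, if_neg hlt]
    simp only [true_iff]
    intro k hk1 hk2
    have hk : lo + hi - k = k := by omega
    rw [hk]

-- a list equals its reverse iff the mirror equations hold on [0, n-1]
theorem reverse_eq_iff (r : List Int) :
    r = r.reverse ↔ ∀ k, k ≤ r.length - 1 → r.getD k 0 = r.getD (r.length - 1 - k) 0 := by
  constructor
  · intro h k hk
    rcases Nat.eq_zero_or_pos r.length with h0 | h0
    · simp [List.getD, List.eq_nil_of_length_eq_zero h0]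
    have hk' : k < r.length := by omega
    have hk'' : r.length - 1 - k < r.length := by omega
    rw [List.getD_eq_getElem r 0 hk', List.getD_eq_getElem r 0 hk'']
    have h1 : r[k] = r.reverse[k]'(by simpa using hk') := List.getElem_of_eq h hk'
    have h2 : r.reverse[k]'(by simpa using hk') = r[r.length - 1 - k]'hk'' := by
      rw [List.getElem_reverse]
    rw [h1, h2]
  · intro h
    apply List.ext_getElem (by simp)
    intro i hi hi'
    rw [List.getElem_reverse]
    have := h i (by omega)
    rw [List.getD_eq_getElem r 0 hi, List.getD_eq_getElem r 0 (by omega : r.length - 1 - i < r.length)] at this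
    exact this

theorem esCapicua_eq_decide (fila : List Int) :
    (decide (fila = fila.reverse)) = esCapicua fila 0 (fila.length - 1) := by
  by_cases h : fila = fila.reverse
  · rw [decide_eq_true h, eq_comm, esCapicua_iff]
    intro k hk1 hk2
    simpa using (reverse_eq_iff fila).mp h k hk2
  · have hf : esCapicua fila 0 (fila.length - 1) ≠ true := by
      intro hc
      rw [esCapicua_iff] at hc
      exact h ((reverse_eq_iff fila).mpr (fun k hk => by simpa using hc k (Nat.zero_le k) hk))
    rw [decide_eq_false h, eq_comm]
    exact Bool.eq_false_iff.mpr hf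

-- A's flag-carrying fold is the conjunction of the per-row comparisons
theorem foldl_flag (m : List (List Int)) (b : Bool) :
    m.foldl (fun res fila =>
      let fila_invertida := fila.reverse
      if fila ≠ fila_invertida then false else res) b
    = (b && m.all fun fila => decide (fila = fila.reverse)) := by
  induction m generalizing b with
  | nil => simp
  | cons x xs ih =>
    simp only [List.foldl_cons, List.all_cons, ih]
    split_ifs with h
    · simp [decide_eq_false (not_not.mp (not_not_intro h))]
    · rw [not_not] at h
      rw [decide_eq_true h, Bool.true_and]

-- ===== VERDICT (by name: the statement is the Claim_ definition above) =====
theorem matriz_capicua_spec : Claim_equal_matriz_capicua := by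
  intro m _
  unfold Spec_matriz_capicua matriz_capicua matriz_capicua_alt
  rw [foldl_flag, Bool.true_and]
  have : (fun fila : List Int => decide (fila = fila.reverse))
       = fun fila => esCapicua fila 0 (fila.length - 1) := funext esCapicua_eq_decide
  rw [this]
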